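-- pv_equiv track=rewrite | github.com/khointn/comp3010-aoc | day5.py | checkDuplicate2Strings
-- ===== SOURCE A (Python) =====
-- def checkDuplicate2Strings(string):
--     StringsOf2 = {}
--
--     hasDuplicate2Strings  = False
--     hasInterleaveStrings  = False
--
--     for i in range(len(string)-1):
--         currentString = (string[i] + string[i+1])
--
--         if (string[i] + string[i+1]) in StringsOf2 and (i >= StringsOf2[string[i:i+2]]+2):
--             hasDuplicate2Strings = True
--
--         elif (string[i] + string[i+1]) not in StringsOf2:
--             StringsOf2[string[i:i+2]] = i
--
--         if i <= len(string)-3: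
--             if string[i] == string[i+2]:
--                 hasInterleaveStrings = True
--
--     return hasDuplicate2Strings and hasInterleaveStrings
-- ===== SOURCE B (Python) =====
-- def checkDuplicate2Strings(string):
--     n = len(string)
--     # a bigram repeats without overlap iff it occurs again as a substring two positions on
--     hasDuplicate2Strings = any(string[i:i+2] in string[i+2:] for i in range(n - 1))
--     hasInterleaveStrings = any(string[i] == string[i + 2] for i in range(n - 2))
--     return hasDuplicate2Strings and hasInterleaveStrings
-- ===== Notes on version B (the rewrite author's own statement) =====
-- stated objective: alternative
-- what changed: A's single stateful scan with a first-occurrence dict and two flags updated on the fly is replaced by two independent any() passes with no dictionary at all: the duplicate test becomes a substring-containment search (does the bigram starting at i occur again in string[i+2:]?) and the interleave test a direct scan; this trades the hash table for quadratic substring search.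
import Mathlib
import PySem

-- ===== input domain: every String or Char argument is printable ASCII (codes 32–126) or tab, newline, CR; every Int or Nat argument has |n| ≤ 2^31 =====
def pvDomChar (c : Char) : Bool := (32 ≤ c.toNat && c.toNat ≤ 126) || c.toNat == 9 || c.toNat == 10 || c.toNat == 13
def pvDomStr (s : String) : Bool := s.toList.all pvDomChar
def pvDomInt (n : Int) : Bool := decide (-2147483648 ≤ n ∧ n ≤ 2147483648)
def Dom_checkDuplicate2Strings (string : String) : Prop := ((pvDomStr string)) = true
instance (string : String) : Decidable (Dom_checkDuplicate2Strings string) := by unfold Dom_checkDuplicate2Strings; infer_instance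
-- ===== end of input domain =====

-- B drops A's stateful dict-scan entirely: two independent any() passes, the duplicate test
-- as a quadratic substring-containment search and the interleave test as a direct scan
-- (objective: alternative algorithm, not faster).


-- ===== PORT A =====
-- A's loop body.  Python's `string[i] + string[i+1]` and `string[i:i+2]` denote the same
-- two-character string at every index the loop visits (i ≤ len-2), ported once as `key`.
-- `string[i]` is in range at every visited index, so `.getD ' '` totalizes pyGet? exactly.
def stepA (s : List Char) (st : PySem.Dict (List Char) Int × Bool × Bool) (i : Int) :
    PySem.Dict (List Char) Int × Bool × Bool :=
  let key : List Char :=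
    [(PySem.List.pyGet? s i).getD ' ', (PySem.List.pyGet? s (i + 1)).getD ' ']
  let st1 : PySem.Dict (List Char) Int × Bool × Bool :=
    if st.1.contains key && decide (st.1.getD key 0 + 2 ≤ i) then
      (st.1, true, st.2.2)
    else if !st.1.contains key then
      (st.1.insert key i, st.2.1, st.2.2)
    else st
  if decide (i ≤ (s.length : Int) - 3) then
    if (PySem.List.pyGet? s i).getD ' ' == (PySem.List.pyGet? s (i + 2)).getD ' ' then
      (st1.1, st1.2.1, true)
    else st1
  else st1

def checkDuplicate2Strings (string : String) : Bool :=
  let s := string.toList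
  let st := (PySem.List.pyRange 0 ((s.length : Int) - 1) 1).foldl (stepA s)
    (PySem.Dict.empty, false, false)
  st.2.1 && st.2.2

-- ===== PORT B =====
-- `string[i:i+2] in string[i+2:]` ports as PySem.Chars.isIn on the two slices;
-- `string[i]` in the second pass is always in range, so `.getD ' '` totalizes exactly.
def checkDuplicate2Strings_alt (string : String) : Bool :=
  let s := string.toList
  let n := s.length
  let hasDup := (List.range (n - 1)).any (fun i =>
    PySem.Chars.isIn (PySem.List.slice s (some (i : Int)) (some ((i : Int) + 2)))
      (PySem.List.slice s (some ((i : Int) + 2)) none))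
  let hasInter := (List.range (n - 2)).any (fun i => s.getD i ' ' == s.getD (i + 2) ' ')
  hasDup && hasInter

-- ===== PRECONDITION & SPEC =====
def Spec_checkDuplicate2Strings (string : String) (out : Bool) : Prop := out = checkDuplicate2Strings_alt string
instance (string : String) (out : Bool) : Decidable (Spec_checkDuplicate2Strings string out) := by unfold Spec_checkDuplicate2Strings; infer_instance

-- ===== CLAIM (what is proved, stated in full; the proofs are below) =====
def Claim_equal_checkDuplicate2Strings : Prop := ∀ (string : String), Dom_checkDuplicate2Strings string → Spec_checkDuplicate2Strings string (checkDuplicate2Strings string)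

-- ===== LEMMAS AND PROOFS =====

-- character and bigram at a position (total, default ' ', which no visited index ever uses)
def cAt (s : List Char) (i : Nat) : Char := s.getD i ' '
def bigAt (s : List Char) (i : Nat) : List Char := [cAt s i, cAt s (i + 1)]

-- "a non-overlapping repeated bigram exists among the first m positions"
def dupUpto (s : List Char) (m : Nat) : Prop :=
  ∃ j, j < m ∧ ∃ i, i + 2 ≤ j ∧ bigAt s i = bigAt s j
-- "an interleave pair exists among the first m positions"
def interUpto (s : List Char) (m : Nat) : Prop :=
  ∃ i, i < m ∧ i + 2 < s.length ∧ cAt s i = cAt s (i + 2)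

-- A's loop body with the index as a Nat (stepA at a cast index computes this)
def gA (s : List Char) (st : PySem.Dict (List Char) Int × Bool × Bool) (i : Nat) :
    PySem.Dict (List Char) Int × Bool × Bool :=
  let key := bigAt s i
  let st1 : PySem.Dict (List Char) Int × Bool × Bool :=
    if st.1.contains key && decide (st.1.getD key 0 + 2 ≤ (i : Int)) then
      (st.1, true, st.2.2)
    else if !st.1.contains key then
      (st.1.insert key (i : Int), st.2.1, st.2.2)
    else st
  if decide (i + 2 < s.length) then
    if cAt s i == cAt s (i + 2) then (st1.1, st1.2.1, true) else st1
  else st1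

lemma stepA_natCast (s : List Char) (st : PySem.Dict (List Char) Int × Bool × Bool) (i : Nat) :
    stepA s st (i : Int) = gA s st i := by
  have h1 : ((i : Int) + 1) = ((i + 1 : Nat) : Int) := by push_cast; ring
  have h2 : ((i : Int) + 2) = ((i + 2 : Nat) : Int) := by push_cast; ring
  have hd : decide ((i : Int) ≤ (s.length : Int) - 3) = decide (i + 2 < s.length) := by
    apply decide_eq_decide.mpr; omega
  simp only [stepA, gA, h1, h2, hd, bigAt, cAt]
  have hg : ∀ (j : Nat), (PySem.List.pyGet? s (j : Int)).getD ' ' = s.getD j ' ' := by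
    intro j
    have h := PySem.List.pyGetD_natCast s j ' '
    simp only [PySem.List.pyGetD] at h
    exact h
  rw [hg i, hg (i + 1), hg (i + 2)]
  rfl

-- occurrence list of a bigram among the first m positions (increasing)
def occ (s : List Char) (m : Nat) (k : List Char) : List Nat :=
  (List.range m).filter (fun i => bigAt s i == k)

lemma mem_occ (s : List Char) (m : Nat) (k : List Char) (x : Nat) :
    x ∈ occ s m k ↔ x < m ∧ bigAt s x = k := by
  simp [occ, List.mem_filter, List.mem_range]

lemma occ_pairwise (s : List Char) (m : Nat) (k : List Char) :
    (occ s m k).Pairwise (· < ·) :=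
  List.Pairwise.filter _ List.pairwise_lt_range

lemma head_min_of_pairwise (l : List Nat) (h : l.Pairwise (· < ·)) (f : Nat)
    (hf : l.head? = some f) : ∀ x ∈ l, f ≤ x := by
  cases l with
  | nil => simp at hf
  | cons a t =>
    simp only [List.head?_cons, Option.some.injEq] at hf
    subst hf
    intro x hx
    rcases List.mem_cons.mp hx with rfl | hx
    · exact le_refl _
    · exact le_of_lt ((List.pairwise_cons.mp h).1 x hx)

lemma occ_succ (s : List Char) (m : Nat) (k : List Char) :
    occ s (m + 1) k = occ s m k ++ (if bigAt s m == k then [m] else []) := by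
  simp only [occ, List.range_succ, List.filter_append]
  cases h : bigAt s m == k <;> simp [List.filter, h]

-- the dict invariant of A's loop: each key maps to (the cast of) its FIRST occurrence
def invA (s : List Char) (m : Nat) (st : PySem.Dict (List Char) Int × Bool × Bool) : Prop :=
  (∀ k, st.1.get? k = ((occ s m k).head?).map (fun i => (i : Int)))
  ∧ (st.2.1 = true ↔ dupUpto s m) ∧ (st.2.2 = true ↔ interUpto s m)

lemma invA_zero (s : List Char) :
    invA s 0 (PySem.Dict.empty, false, false) := by
  refine ⟨fun k => by simp [occ, PySem.Dict.get?_empty], ?_, ?_⟩ <;>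
    simp [dupUpto, interUpto]

set_option maxHeartbeats 1000000 in
lemma invA_step (s : List Char) (m : Nat) (st : PySem.Dict (List Char) Int × Bool × Bool)
    (h : invA s m st) : invA s (m + 1) (gA s st m) := by
  obtain ⟨d, dup, inter⟩ := st
  obtain ⟨hd, hdup, hinter⟩ := h
  simp only at hd hdup hinter
  have hcontains : d.contains (bigAt s m) = ((occ s m (bigAt s m)).head?).isSome := by
    rw [PySem.Dict.contains_eq_isSome_get?, hd]
    cases (occ s m (bigAt s m)).head? <;> simp
  have hcond : (d.contains (bigAt s m) && decide (d.getD (bigAt s m) 0 + 2 ≤ (m : Int)))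
      = true ↔ ∃ i, i + 2 ≤ m ∧ bigAt s i = bigAt s m := by
    rcases hh : (occ s m (bigAt s m)).head? with _ | f
    · have hocc : occ s m (bigAt s m) = [] := List.head?_eq_none_iff.mp hh
      rw [hcontains, hh]
      simp only [Option.isSome_none, Bool.false_and, Bool.false_eq_true, false_iff]
      rintro ⟨i, hi2, hbi⟩
      have hmem : i ∈ occ s m (bigAt s m) := (mem_occ s m _ i).mpr ⟨by omega, hbi⟩
      rw [hocc] at hmem
      simp at hmem
    · have hfmem : f ∈ occ s m (bigAt s m) := List.mem_of_mem_head? hh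
      have hflt := (mem_occ s m _ f).mp hfmem
      have hgetD : d.getD (bigAt s m) 0 = (f : Int) := by
        rw [PySem.Dict.getD_eq_get?_getD, hd, hh]
        rfl
      rw [hcontains, hh, hgetD]
      simp only [Option.isSome_some, Bool.true_and, decide_eq_true_eq]
      constructor
      · intro hle
        exact ⟨f, by omega, hflt.2⟩
      · rintro ⟨i, hi2, hbi⟩
        have hmem : i ∈ occ s m (bigAt s m) := (mem_occ s m _ i).mpr ⟨by omega, hbi⟩
        have hmin := head_min_of_pairwise _ (occ_pairwise s m _) f hh i hmem
        omega
  have hdupsplit : dupUpto s (m + 1) ↔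
      dupUpto s m ∨ ∃ i, i + 2 ≤ m ∧ bigAt s i = bigAt s m := by
    constructor
    · rintro ⟨j, hj, i, hi, hb⟩
      rcases Nat.lt_succ_iff_lt_or_eq.mp hj with hj' | rfl
      · exact Or.inl ⟨j, hj', i, hi, hb⟩
      · exact Or.inr ⟨i, hi, hb⟩
    · rintro (⟨j, hj, i, hi, hb⟩ | ⟨i, hi, hb⟩)
      · exact ⟨j, by omega, i, hi, hb⟩
      · exact ⟨m, by omega, i, hi, hb⟩
  have hintersplit : interUpto s (m + 1) ↔
      interUpto s m ∨ (m + 2 < s.length ∧ cAt s m = cAt s (m + 2)) := by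
    constructor
    · rintro ⟨i, hi, h2, he⟩
      rcases Nat.lt_succ_iff_lt_or_eq.mp hi with hi' | rfl
      · exact Or.inl ⟨i, hi', h2, he⟩
      · exact Or.inr ⟨h2, he⟩
    · rintro (⟨i, hi, h2, he⟩ | ⟨h2, he⟩)
      · exact ⟨i, by omega, h2, he⟩
      · exact ⟨m, by omega, h2, he⟩
  -- the dict after the first stage, in the two cases
  have hdict_same : d.contains (bigAt s m) = true →
      ∀ k, d.get? k = ((occ s (m + 1) k).head?).map (fun i => (i : Int)) := by
    intro hc k
    rw [occ_succ]
    by_cases hk : (bigAt s m == k) = true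
    · have hkk : bigAt s m = k := beq_iff_eq.mp hk
      subst hkk
      have hne : occ s m (bigAt s m) ≠ [] := by
        intro he
        rw [hcontains, List.head?_eq_none_iff.mpr he] at hc
        simp at hc
      rw [List.head?_append_of_ne_nil _ hne]
      exact hd _
    · have hkf : (bigAt s m == k) = false := by simpa using hk
      rw [hkf]
      simp only [Bool.false_eq_true, if_false, List.append_nil]
      exact hd k
  have hdict_insert : d.contains (bigAt s m) = false →
      ∀ k, (d.insert (bigAt s m) (m : Int)).get? k
        = ((occ s (m + 1) k).head?).map (fun i => (i : Int)) := by
    intro hc k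
    rw [occ_succ]
    by_cases hk : (bigAt s m == k) = true
    · have hkk : bigAt s m = k := beq_iff_eq.mp hk
      subst hkk
      have hocc : occ s m (bigAt s m) = [] := by
        rcases hh : (occ s m (bigAt s m)).head? with _ | f
        · exact List.head?_eq_none_iff.mp hh
        · rw [hcontains, hh] at hc; simp at hc
      rw [PySem.Dict.get?_insert_self, hocc]
      simp
    · have hkne : k ≠ bigAt s m := fun he => by simp [he] at hk
      have hkf : (bigAt s m == k) = false := by simpa using hk
      rw [PySem.Dict.get?_insert, if_neg hkne, hkf]
      simp only [Bool.false_eq_true, if_false, List.append_nil]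
      exact hd k
  -- dup flag after the first stage
  have hdup_true : (d.contains (bigAt s m) && decide (d.getD (bigAt s m) 0 + 2 ≤ (m : Int))) = true →
      (true = true ↔ dupUpto s (m + 1)) := by
    intro hc
    simp only [true_iff]
    exact hdupsplit.mpr (Or.inr (hcond.mp hc))
  have hdup_false : (d.contains (bigAt s m) && decide (d.getD (bigAt s m) 0 + 2 ≤ (m : Int))) = false →
      (dup = true ↔ dupUpto s (m + 1)) := by
    intro hc
    have hno : ¬ ∃ i, i + 2 ≤ m ∧ bigAt s i = bigAt s m := by
      intro he
      rw [hcond.mpr he] at hc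
      exact Bool.true_eq_false.mp hc
    rw [hdup, hdupsplit]
    exact ⟨Or.inl, fun h => h.resolve_right hno⟩
  -- now reduce gA by cases
  by_cases c1 : (d.contains (bigAt s m) && decide (d.getD (bigAt s m) 0 + 2 ≤ (m : Int))) = true
  · by_cases clen : m + 2 < s.length
    · have hlen : decide (m + 2 < s.length) = true := decide_eq_true clen
      by_cases ceq : (cAt s m == cAt s (m + 2)) = true
      · simp only [gA, c1, hlen, ceq, if_true]
        refine ⟨hdict_same (Bool.and_eq_true_iff.mp c1).1, hdup_true c1, ?_⟩
        simp only [true_iff]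
        exact hintersplit.mpr (Or.inr ⟨clen, beq_iff_eq.mp ceq⟩)
      · have ceqf : (cAt s m == cAt s (m + 2)) = false := by simpa using ceq
        simp only [gA, c1, hlen, ceqf, Bool.false_eq_true, if_true, if_false]
        refine ⟨hdict_same (Bool.and_eq_true_iff.mp c1).1, hdup_true c1, ?_⟩
        rw [hinter, hintersplit]
        have hni : ¬ (m + 2 < s.length ∧ cAt s m = cAt s (m + 2)) := by
          rintro ⟨_, he⟩
          exact ceq (beq_iff_eq.mpr he)
        exact ⟨Or.inl, fun h => h.resolve_right hni⟩
    · have hlenf : decide (m + 2 < s.length) = false := decide_eq_false clen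
      simp only [gA, c1, hlenf, Bool.false_eq_true, if_true, if_false]
      refine ⟨hdict_same (Bool.and_eq_true_iff.mp c1).1, hdup_true c1, ?_⟩
      rw [hinter, hintersplit]
      exact ⟨Or.inl, fun h => h.resolve_right (fun hh => clen hh.1)⟩
  · have c1' : (d.contains (bigAt s m) && decide (d.getD (bigAt s m) 0 + 2 ≤ (m : Int))) = false :=
      Bool.not_eq_true _ ▸ (by simpa using c1)
    by_cases c2 : d.contains (bigAt s m) = true
    · -- key present, condition false: state unchanged in stage 1
      have hnotc2 : (!d.contains (bigAt s m)) = false := by rw [c2]; rfl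
      by_cases clen : m + 2 < s.length
      · have hlen : decide (m + 2 < s.length) = true := decide_eq_true clen
        by_cases ceq : (cAt s m == cAt s (m + 2)) = true
        · simp only [gA, c1', hnotc2, hlen, ceq, if_true, if_false,
            Bool.false_eq_true]
          refine ⟨hdict_same c2, hdup_false c1', ?_⟩
          simp only [true_iff]
          exact hintersplit.mpr (Or.inr ⟨clen, beq_iff_eq.mp ceq⟩)
        · have ceqf : (cAt s m == cAt s (m + 2)) = false := by simpa using ceq
          simp only [gA, c1', hnotc2, hlen, ceqf, if_true, if_false,
            Bool.false_eq_true]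
          refine ⟨hdict_same c2, hdup_false c1', ?_⟩
          rw [hinter, hintersplit]
          have hni : ¬ (m + 2 < s.length ∧ cAt s m = cAt s (m + 2)) := by
            rintro ⟨_, he⟩
            exact ceq (beq_iff_eq.mpr he)
          exact ⟨Or.inl, fun h => h.resolve_right hni⟩
      · have hlenf : decide (m + 2 < s.length) = false := decide_eq_false clen
        simp only [gA, c1', hnotc2, hlenf, if_false, Bool.false_eq_true]
        refine ⟨hdict_same c2, hdup_false c1', ?_⟩
        rw [hinter, hintersplit]
        exact ⟨Or.inl, fun h => h.resolve_right (fun hh => clen hh.1)⟩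
    · -- key absent: insert
      have c2' : d.contains (bigAt s m) = false := by simpa using c2
      have hnotc2 : (!d.contains (bigAt s m)) = true := by rw [c2']; rfl
      by_cases clen : m + 2 < s.length
      · have hlen : decide (m + 2 < s.length) = true := decide_eq_true clen
        by_cases ceq : (cAt s m == cAt s (m + 2)) = true
        · simp only [gA, c1', hnotc2, hlen, ceq, if_true, if_false,
            Bool.false_eq_true]
          refine ⟨hdict_insert c2', hdup_false c1', ?_⟩
          simp only [true_iff]
          exact hintersplit.mpr (Or.inr ⟨clen, beq_iff_eq.mp ceq⟩)
        · have ceqf : (cAt s m == cAt s (m + 2)) = false := by simpa using ceq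
          simp only [gA, c1', hnotc2, hlen, ceqf, if_true, if_false,
            Bool.false_eq_true]
          refine ⟨hdict_insert c2', hdup_false c1', ?_⟩
          rw [hinter, hintersplit]
          have hni : ¬ (m + 2 < s.length ∧ cAt s m = cAt s (m + 2)) := by
            rintro ⟨_, he⟩
            exact ceq (beq_iff_eq.mpr he)
          exact ⟨Or.inl, fun h => h.resolve_right hni⟩
      · have hlenf : decide (m + 2 < s.length) = false := decide_eq_false clen
        simp only [gA, c1', hnotc2, hlenf, if_false, if_true, Bool.false_eq_true]
        refine ⟨hdict_insert c2', hdup_false c1', ?_⟩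
        rw [hinter, hintersplit]
        exact ⟨Or.inl, fun h => h.resolve_right (fun hh => clen hh.1)⟩

lemma invA_range (s : List Char) (m : Nat) :
    invA s m ((List.range m).foldl (gA s) (PySem.Dict.empty, false, false)) := by
  induction m with
  | zero => simpa using invA_zero s
  | succ m ih =>
    rw [List.range_succ, List.foldl_append]
    exact invA_step s m _ ih

-- A computes "dupUpto (n-1) and interUpto (n-1)"
lemma pyRange_len (s : List Char) : PySem.List.pyRange 0 ((s.length : Int) - 1) 1
    = (List.range (s.length - 1)).map Int.ofNat := by
  rcases hn : s.length with _ | m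
  · decide
  · have h1 : ((m + 1 : Nat) : Int) - 1 = (m : Int) := by push_cast; ring
    rw [h1, PySem.List.pyRange_zero_natCast, Nat.add_sub_cancel]
    rfl

lemma foldl_stepA_eq (s : List Char) (l : List Nat)
    (st : PySem.Dict (List Char) Int × Bool × Bool) :
    (l.map Int.ofNat).foldl (stepA s) st = l.foldl (gA s) st := by
  induction l generalizing st with
  | nil => rfl
  | cons a l ih =>
    simp only [List.map_cons, List.foldl_cons]
    rw [show stepA s st (Int.ofNat a) = gA s st a from stepA_natCast s st a]
    exact ih _

lemma checkA_iff (string : String) :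
    checkDuplicate2Strings string = true ↔
      (dupUpto string.toList (string.toList.length - 1)
        ∧ interUpto string.toList (string.toList.length - 1)) := by
  obtain ⟨_, hdup, hinter⟩ := invA_range string.toList (string.toList.length - 1)
  have hfold : (PySem.List.pyRange 0 ((string.toList.length : Int) - 1) 1).foldl
      (stepA string.toList) (PySem.Dict.empty, false, false)
      = (List.range (string.toList.length - 1)).foldl (gA string.toList)
        (PySem.Dict.empty, false, false) := by
    rw [pyRange_len]
    exact foldl_stepA_eq _ _ _
  show (((PySem.List.pyRange 0 ((string.toList.length : Int) - 1) 1).foldl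
      (stepA string.toList) (PySem.Dict.empty, false, false)).2.1
    && ((PySem.List.pyRange 0 ((string.toList.length : Int) - 1) 1).foldl
      (stepA string.toList) (PySem.Dict.empty, false, false)).2.2) = true ↔ _
  rw [hfold, Bool.and_eq_true, hdup, hinter]

-- ===== B side =====

-- B's interleave pass
lemma interB_iff (s : List Char) :
    (List.range (s.length - 2)).any (fun i => s.getD i ' ' == s.getD (i + 2) ' ') = true
      ↔ interUpto s (s.length - 1) := by
  rw [List.any_eq_true]
  constructor
  · rintro ⟨i, hi, he⟩
    rw [List.mem_range] at hi
    exact ⟨i, by omega, by omega, beq_iff_eq.mp he⟩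
  · rintro ⟨i, hi, h2, he⟩
    exact ⟨i, List.mem_range.mpr (by omega), beq_iff_eq.mpr he⟩

lemma getD_drop (s : List Char) (i k : Nat) :
    (s.drop i).getD k ' ' = s.getD (i + k) ' ' := by
  simp [List.getD_eq_getElem?_getD, List.getElem?_drop]

-- a two-element list is an infix exactly where both characters match
lemma pair_infix_iff (a b : Char) (t : List Char) :
    [a, b] <:+: t ↔ ∃ k, k + 1 < t.length ∧ t.getD k ' ' = a ∧ t.getD (k + 1) ' ' = b := by
  induction t with
  | nil =>
    simp only [List.length_nil]
    constructor
    · intro h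
      have := h.length_le
      simp at this
    · rintro ⟨k, hk, _⟩; omega
  | cons c t ih =>
    rw [List.infix_cons_iff, ih]
    constructor
    · rintro (hp | ⟨k, hk, h1, h2⟩)
      · rcases hp with ⟨u, hu⟩
        cases t with
        | nil => simp at hu
        | cons d t' =>
          injection hu with h1 h2
          injection h2 with h3 _
          exact ⟨0, by simp, by simp [h1], by simp [h3]⟩
      · exact ⟨k + 1, by simp; omega, by simpa using h1, by simpa using h2⟩
    · rintro ⟨k, hk, h1, h2⟩
      cases k with
      | zero =>
        left
        cases t with
        | nil => simp at hk
        | cons d t' =>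
          simp only [List.getD_cons_zero] at h1
          have h2' : d = b := by simpa using h2
          exact ⟨t', by rw [h1, h2']; rfl⟩
      | succ k =>
        right
        exact ⟨k, by simp at hk; omega, by simpa using h1, by simpa using h2⟩

-- the bigram slice at a visited index i (i + 1 < length) is bigAt s i
lemma slice_bigram (s : List Char) (i : Nat) (hi : i + 1 < s.length) :
    PySem.List.slice s (some (i : Int)) (some ((i : Int) + 2)) = bigAt s i := by
  have h2 : ((i : Int) + 2) = ((i : Int) + ((2 : Nat) : Int)) := by norm_num
  rw [h2, PySem.List.slice_natCast_add]
  rcases h : s.drop i with _ | ⟨a, t⟩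
  · have := List.length_drop (l := s) (i := i); rw [h] at this; simp at this; omega
  · rcases h' : t with _ | ⟨b, t'⟩
    · have := List.length_drop (l := s) (i := i)
      rw [h, h'] at this; simp at this; omega
    · have ha : a = s.getD i ' ' := by
        have := getD_drop s i 0
        rw [h] at this; simpa using this
      have hb : b = s.getD (i + 1) ' ' := by
        have := getD_drop s i 1
        rw [h, h'] at this; simpa using this
      subst h'
      simp [List.take, bigAt, cAt, ha, hb]

lemma dupB_iff (s : List Char) :
    (List.range (s.length - 1)).any (fun i =>
      PySem.Chars.isIn (PySem.List.slice s (some (i : Int)) (some ((i : Int) + 2)))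
        (PySem.List.slice s (some ((i : Int) + 2)) none)) = true
      ↔ dupUpto s (s.length - 1) := by
  rw [List.any_eq_true]
  constructor
  · rintro ⟨i, hi, hin⟩
    rw [List.mem_range] at hi
    rw [slice_bigram s i (by omega)] at hin
    have h2 : ((i : Int) + 2) = (((i + 2 : Nat)) : Int) := by push_cast; ring
    rw [h2, PySem.List.slice_from_natCast] at hin
    rw [PySem.Chars.isIn_iff_infix] at hin
    simp only [bigAt, cAt] at hin
    rw [pair_infix_iff] at hin
    obtain ⟨k, hk, h1, hb⟩ := hin
    rw [List.length_drop] at hk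
    rw [getD_drop] at h1 hb
    refine ⟨i + 2 + k, by omega, i, by omega, ?_⟩
    simp only [bigAt, cAt]
    rw [h1, show i + 2 + k + 1 = i + 2 + (k + 1) by omega, hb]
  · rintro ⟨j, hj, i, hij, hb⟩
    have hi : i < s.length - 1 := by omega
    refine ⟨i, List.mem_range.mpr hi, ?_⟩
    rw [slice_bigram s i (by omega)]
    have h2 : ((i : Int) + 2) = (((i + 2 : Nat)) : Int) := by push_cast; ring
    rw [h2, PySem.List.slice_from_natCast, PySem.Chars.isIn_iff_infix]
    simp only [bigAt, cAt]
    rw [pair_infix_iff]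
    refine ⟨j - (i + 2), by rw [List.length_drop]; omega, ?_, ?_⟩
    · rw [getD_drop, show i + 2 + (j - (i + 2)) = j by omega]
      have := congrArg (fun l : List Char => l.getD 0 ' ') hb
      simpa [bigAt, cAt] using this.symm
    · rw [getD_drop, show i + 2 + (j - (i + 2) + 1) = j + 1 by omega]
      have := congrArg (fun l : List Char => l.getD 1 ' ') hb
      simpa [bigAt, cAt] using this.symm

lemma checkB_iff (string : String) :
    checkDuplicate2Strings_alt string = true ↔
      (dupUpto string.toList (string.toList.length - 1)
        ∧ interUpto string.toList (string.toList.length - 1)) := by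
  show (((List.range (string.toList.length - 1)).any (fun i =>
      PySem.Chars.isIn (PySem.List.slice string.toList (some (i : Int)) (some ((i : Int) + 2)))
        (PySem.List.slice string.toList (some ((i : Int) + 2)) none)))
    && (List.range (string.toList.length - 2)).any
        (fun i => string.toList.getD i ' ' == string.toList.getD (i + 2) ' ')) = true ↔ _
  rw [Bool.and_eq_true, dupB_iff, interB_iff]

-- ===== VERDICT (by name: the statement is the Claim_ definition above) =====
theorem checkDuplicate2Strings_spec : Claim_equal_checkDuplicate2Strings := by
  intro string _
  unfold Spec_checkDuplicate2Strings
  rw [Bool.eq_iff_iff, checkA_iff, checkB_iff]
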